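-- pv_equiv track=rewrite | github.com/Akylas/alpimaps_data_generator | scripts/utils/tilemask.py | _tileMaskUnion
-- ===== SOURCE A (Python) =====
-- def _buildTiles(x, y, zoom, maxZoom):
--   if zoom > maxZoom:
--     return []
--   tiles = [(x, y, zoom)]
--   tiles += _buildTiles(x * 2 + 0, y * 2 + 0, zoom + 1, maxZoom)
--   tiles += _buildTiles(x * 2 + 1, y * 2 + 0, zoom + 1, maxZoom)
--   tiles += _buildTiles(x * 2 + 0, y * 2 + 1, zoom + 1, maxZoom)
--   tiles += _buildTiles(x * 2 + 1, y * 2 + 1, zoom + 1, maxZoom)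
--   return tiles
--
-- def _tileMaskTiles(x, y, zoom, maxZoom, data):
--   submask = data.pop(0)
--   tiles = [(x, y, zoom)] if data.pop(0) else []
--   if submask:
--     tiles += _tileMaskTiles(x * 2 + 0, y * 2 + 0, zoom + 1, maxZoom, data)
--     tiles += _tileMaskTiles(x * 2 + 1, y * 2 + 0, zoom + 1, maxZoom, data)
--     tiles += _tileMaskTiles(x * 2 + 0, y * 2 + 1, zoom + 1, maxZoom, data)
--     tiles += _tileMaskTiles(x * 2 + 1, y * 2 + 1, zoom + 1, maxZoom, data)
--   elif maxZoom is not None: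
--     if maxZoom > zoom and (x, y, zoom) in tiles:
--       tiles = _buildTiles(x, y, zoom, maxZoom)
--   return tiles
--
-- def _tileMaskUnion(x, y, zoom, data1, data2):
--   submask1 = data1.pop(0)
--   submask2 = data2.pop(0)
--   inside1 = data1.pop(0)
--   inside2 = data2.pop(0)
--   tiles = [(x, y, zoom)] if inside1 or inside2 else []
--   for dy in (0, 1):
--     for dx in (0, 1):
--       if submask1 and submask2:
--         tiles += _tileMaskUnion(x * 2 + dx, y * 2 + dy, zoom + 1, data1, data2)
--       elif submask1:
--         tiles += _tileMaskTiles(x * 2 + dx, y * 2 + dy, zoom + 1, None, data1)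
--       elif submask2:
--         tiles += _tileMaskTiles(x * 2 + dx, y * 2 + dy, zoom + 1, None, data2)
--   return tiles
-- ===== SOURCE B (Python) =====
-- # Iterative explicit-stack re-implementation of the recursive quadtree union
-- # (same return value and same in-place pop(0) consumption of data1/data2).
-- def _tileMaskUnion(x, y, zoom, data1, data2):
--     tiles = []
--     stack = [(x, y, zoom, 2)]  # mode: 2 = both masks, 0 = only data1, 1 = only data2
--     while stack:
--         x, y, z, mode = stack.pop()
--         if mode == 2:
--             s1 = data1.pop(0)
--             s2 = data2.pop(0)
--             i1 = data1.pop(0)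
--             i2 = data2.pop(0)
--             if i1 or i2:
--                 tiles.append((x, y, z))
--             if s1 and s2:
--                 child = 2
--             elif s1:
--                 child = 0
--             elif s2:
--                 child = 1
--             else:
--                 child = None
--         else:
--             d = data1 if mode == 0 else data2
--             s = d.pop(0)
--             if d.pop(0):
--                 tiles.append((x, y, z))
--             child = mode if s else None
--         if child is not None:
--             for dy in (1, 0):
--                 for dx in (1, 0):
--                     stack.append((x * 2 + dx, y * 2 + dy, z + 1, child))
--     return tiles
-- ===== Notes on version B (the rewrite author's own statement) =====
-- stated objective: alternative
-- what changed: Replaces the three mutually recursive functions with a single iterative explicit-stack preorder traversal over mode-tagged frames (both/only-mask1/only-mask2), consuming the masks with the same pop(0) order and appending tiles at visit time.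
import Mathlib
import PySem

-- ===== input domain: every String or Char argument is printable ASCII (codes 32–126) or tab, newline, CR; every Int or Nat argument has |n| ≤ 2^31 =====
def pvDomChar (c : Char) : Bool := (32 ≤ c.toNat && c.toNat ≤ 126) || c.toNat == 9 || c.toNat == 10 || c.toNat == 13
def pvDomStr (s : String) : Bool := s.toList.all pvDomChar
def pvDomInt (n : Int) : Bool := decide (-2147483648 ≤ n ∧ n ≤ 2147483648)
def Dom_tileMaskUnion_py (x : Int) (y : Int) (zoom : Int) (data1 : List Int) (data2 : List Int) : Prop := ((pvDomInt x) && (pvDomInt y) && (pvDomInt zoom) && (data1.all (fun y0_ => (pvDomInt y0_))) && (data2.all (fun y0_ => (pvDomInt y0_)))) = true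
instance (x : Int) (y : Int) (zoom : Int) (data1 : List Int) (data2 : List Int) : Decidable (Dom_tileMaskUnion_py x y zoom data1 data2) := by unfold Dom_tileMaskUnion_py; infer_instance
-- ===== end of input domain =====

-- B is an iterative explicit-stack rewrite of A's mutual recursion (same return value).
-- Both Pythons mutate data1/data2 in place via pop(0) (identically); the equivalence
-- proved here is about the RETURN value (the Lean ports thread the lists functionally).

-- ===== PORT A =====
-- _buildTiles; the fuel argument only makes the Python recursion (bounded by maxZoom-zoom) total.
def tmBuild (fuel : Nat) (x : Int) (y : Int) (zoom : Int) (maxZoom : Int) : List (List Int) :=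
  match fuel with
  | 0 => []
  | fuel + 1 =>
    if zoom > maxZoom then []
    else
      [[x, y, zoom]]
        ++ tmBuild fuel (x * 2 + 0) (y * 2 + 0) (zoom + 1) maxZoom
        ++ tmBuild fuel (x * 2 + 1) (y * 2 + 0) (zoom + 1) maxZoom
        ++ tmBuild fuel (x * 2 + 0) (y * 2 + 1) (zoom + 1) maxZoom
        ++ tmBuild fuel (x * 2 + 1) (y * 2 + 1) (zoom + 1) maxZoom

-- _tileMaskTiles; returns (tiles, remaining data) since Python consumes data via pop(0).
-- fuel is a totality device only; the wildcard case is Python's IndexError (outside Pre_).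
def tmTiles (fuel : Nat) (x : Int) (y : Int) (zoom : Int) (maxZoom : Option Int) (data : List Int) : List (List Int) × List Int :=
  match fuel, data with
  | fuel + 1, submask :: inside :: data =>
    let tiles := if inside ≠ 0 then [[x, y, zoom]] else []
    if submask ≠ 0 then
      let (t1, data) := tmTiles fuel (x * 2 + 0) (y * 2 + 0) (zoom + 1) maxZoom data
      let (t2, data) := tmTiles fuel (x * 2 + 1) (y * 2 + 0) (zoom + 1) maxZoom data
      let (t3, data) := tmTiles fuel (x * 2 + 0) (y * 2 + 1) (zoom + 1) maxZoom data
      let (t4, data) := tmTiles fuel (x * 2 + 1) (y * 2 + 1) (zoom + 1) maxZoom data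
      (tiles ++ t1 ++ t2 ++ t3 ++ t4, data)
    else
      match maxZoom with
      | some mz =>
        if mz > zoom ∧ [x, y, zoom] ∈ tiles then ((tmBuild ((mz - zoom).toNat + 1) x y zoom mz), data)
        else (tiles, data)
      | none => (tiles, data)
  | _, data => ([], data)

-- _tileMaskUnion; the (dy,dx) loop is unrolled in its iteration order (0,0),(1,0),(0,1),(1,1);
-- the three-way branch on submask1/submask2 is loop-invariant, so it is tested once here.
def tmUnion (fuel : Nat) (x : Int) (y : Int) (zoom : Int) (d1 : List Int) (d2 : List Int) : List (List Int) × List Int × List Int :=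
  match fuel, d1, d2 with
  | fuel + 1, s1 :: i1 :: d1, s2 :: i2 :: d2 =>
    let tiles := if i1 ≠ 0 ∨ i2 ≠ 0 then [[x, y, zoom]] else []
    if s1 ≠ 0 ∧ s2 ≠ 0 then
      let (t1, d1, d2) := tmUnion fuel (x * 2 + 0) (y * 2 + 0) (zoom + 1) d1 d2
      let (t2, d1, d2) := tmUnion fuel (x * 2 + 1) (y * 2 + 0) (zoom + 1) d1 d2
      let (t3, d1, d2) := tmUnion fuel (x * 2 + 0) (y * 2 + 1) (zoom + 1) d1 d2
      let (t4, d1, d2) := tmUnion fuel (x * 2 + 1) (y * 2 + 1) (zoom + 1) d1 d2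
      (tiles ++ t1 ++ t2 ++ t3 ++ t4, d1, d2)
    else if s1 ≠ 0 then
      let (t1, d1) := tmTiles fuel (x * 2 + 0) (y * 2 + 0) (zoom + 1) none d1
      let (t2, d1) := tmTiles fuel (x * 2 + 1) (y * 2 + 0) (zoom + 1) none d1
      let (t3, d1) := tmTiles fuel (x * 2 + 0) (y * 2 + 1) (zoom + 1) none d1
      let (t4, d1) := tmTiles fuel (x * 2 + 1) (y * 2 + 1) (zoom + 1) none d1
      (tiles ++ t1 ++ t2 ++ t3 ++ t4, d1, d2)
    else if s2 ≠ 0 then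
      let (t1, d2) := tmTiles fuel (x * 2 + 0) (y * 2 + 0) (zoom + 1) none d2
      let (t2, d2) := tmTiles fuel (x * 2 + 1) (y * 2 + 0) (zoom + 1) none d2
      let (t3, d2) := tmTiles fuel (x * 2 + 0) (y * 2 + 1) (zoom + 1) none d2
      let (t4, d2) := tmTiles fuel (x * 2 + 1) (y * 2 + 1) (zoom + 1) none d2
      (tiles ++ t1 ++ t2 ++ t3 ++ t4, d1, d2)
    else
      (tiles, d1, d2)
  | _, d1, d2 => ([], d1, d2)

def tileMaskUnion_py (x : Int) (y : Int) (zoom : Int) (data1 : List Int) (data2 : List Int) : List (List Int) :=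
  (tmUnion (data1.length + data2.length + 1) x y zoom data1 data2).1

-- ===== PORT B =====
-- Python pushes the four children as (dy,dx) = (1,1),(1,0),(0,1),(0,0) and pops LIFO,
-- so the top of the stack after a push is the (0,0) child.
def altPush (x : Int) (y : Int) (z : Int) (child : Option Int) (st : List (Int × Int × Int × Int)) : List (Int × Int × Int × Int) :=
  match child with
  | none => st
  | some c =>
    (x * 2 + 0, y * 2 + 0, z + 1, c) :: (x * 2 + 1, y * 2 + 0, z + 1, c)
      :: (x * 2 + 0, y * 2 + 1, z + 1, c) :: (x * 2 + 1, y * 2 + 1, z + 1, c) :: st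

-- the while loop; mode 2 = both masks, 0 = only data1, 1 = only data2.
-- The short-data wildcard cases are Python's IndexError (outside Pre_).
def altLoop (st : List (Int × Int × Int × Int)) (d1 : List Int) (d2 : List Int) (tiles : List (List Int)) : List (List Int) :=
  match st with
  | [] => tiles
  | (x, y, z, mode) :: st =>
    if mode = 2 then
      match d1, d2 with
      | s1 :: i1 :: d1, s2 :: i2 :: d2 =>
        let tiles := if i1 ≠ 0 ∨ i2 ≠ 0 then tiles ++ [[x, y, z]] else tiles
        let child := if s1 ≠ 0 ∧ s2 ≠ 0 then some 2 else if s1 ≠ 0 then some 0 else if s2 ≠ 0 then some 1 else none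
        altLoop (altPush x y z child st) d1 d2 tiles
      | _, _ => tiles
    else if mode = 0 then
      match d1 with
      | s :: i :: d1 =>
        let tiles := if i ≠ 0 then tiles ++ [[x, y, z]] else tiles
        altLoop (altPush x y z (if s ≠ 0 then some 0 else none) st) d1 d2 tiles
      | _ => tiles
    else
      match d2 with
      | s :: i :: d2 =>
        let tiles := if i ≠ 0 then tiles ++ [[x, y, z]] else tiles
        altLoop (altPush x y z (if s ≠ 0 then some 1 else none) st) d1 d2 tiles
      | _ => tiles
termination_by 2 * (d1.length + d2.length) + st.length
decreasing_by all_goals (simp only [altPush]; split <;> simp <;> omega)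

def tileMaskUnion_py_alt (x : Int) (y : Int) (zoom : Int) (data1 : List Int) (data2 : List Int) : List (List Int) :=
  altLoop [(x, y, zoom, 2)] data1 data2 []

-- ===== PRECONDITION & SPEC =====
-- Grammar check for the serialized quadtree mask format: parseNodes k l consumes k
-- nodes (each node = a submask flag, an inside flag, and — iff the submask flag is
-- nonzero — four child nodes) and returns the unconsumed suffix.  This is a shape
-- check on the input (a parser for the data format), not a copy of either port.
def parseNodes : Nat → List Int → Option (List Int)
  | 0, l => some l
  | k + 1, s :: _i :: t => parseNodes (if s = 0 then k else k + 4) t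
  | _ + 1, _ => none

-- Pre_ excludes exactly the inputs where Python's pop(0) raises IndexError: each data
-- list must start with a well-formed serialized mask (leftover elements are allowed).
def Pre_tileMaskUnion_py (x : Int) (y : Int) (zoom : Int) (data1 : List Int) (data2 : List Int) : Prop :=
  (parseNodes 1 data1).isSome ∧ (parseNodes 1 data2).isSome
instance (x : Int) (y : Int) (zoom : Int) (data1 : List Int) (data2 : List Int) : Decidable (Pre_tileMaskUnion_py x y zoom data1 data2) := by unfold Pre_tileMaskUnion_py; infer_instance

def pvWitness_tileMaskUnion_py : Int × Int × Int × List Int × List Int := (0, 0, 0, [1, 1, 0, 1, 0, 0, 0, 0, 0, 1], [0, 1])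

def Spec_tileMaskUnion_py (x : Int) (y : Int) (zoom : Int) (data1 : List Int) (data2 : List Int) (out : List (List Int)) : Prop := out = tileMaskUnion_py_alt x y zoom data1 data2
instance (x : Int) (y : Int) (zoom : Int) (data1 : List Int) (data2 : List Int) (out : List (List Int)) : Decidable (Spec_tileMaskUnion_py x y zoom data1 data2 out) := by unfold Spec_tileMaskUnion_py; infer_instance

-- ===== CLAIM (what is proved, stated in full; the proofs are below) =====
def Claim_equal_tileMaskUnion_py : Prop := ∀ (x : Int) (y : Int) (zoom : Int) (data1 : List Int) (data2 : List Int), Dom_tileMaskUnion_py x y zoom data1 data2 → Pre_tileMaskUnion_py x y zoom data1 data2 → Spec_tileMaskUnion_py x y zoom data1 data2 (tileMaskUnion_py x y zoom data1 data2)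

-- ===== LEMMAS AND PROOFS =====


def pMask (l : List Int) : Option (List Int) := parseNodes 1 l

lemma parseNodes_length : ∀ (n : Nat) (l : List Int), l.length ≤ n →
    ∀ (k : Nat) (r : List Int), parseNodes k l = some r → r.length ≤ l.length := by
  intro n
  induction n with
  | zero =>
    intro l hl k r h
    match k, l, h with
    | 0, l, h => simp [parseNodes] at h; simp [h]
    | k + 1, [], h => simp [parseNodes] at h
    | k + 1, [a], h => simp [parseNodes] at h
    | k + 1, s :: i :: t, h => simp at hl
  | succ n ih =>
    intro l hl k r h
    match k, l, h with
    | 0, l, h => simp [parseNodes] at h; simp [h]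
    | k + 1, [], h => simp [parseNodes] at h
    | k + 1, [a], h => simp [parseNodes] at h
    | k + 1, s :: i :: t, h =>
      rw [parseNodes] at h
      have := ih t (by simp at hl ⊢; omega) _ r h
      simp only [List.length_cons]
      omega

lemma parseNodes_add : ∀ (n : Nat) (l : List Int), l.length ≤ n →
    ∀ (k j : Nat), parseNodes (k + j) l = (parseNodes k l).bind (fun r => parseNodes j r) := by
  intro n
  induction n with
  | zero =>
    intro l hl k j
    match k, l with
    | 0, l => simp [parseNodes]
    | k + 1, [] => simp [parseNodes, Nat.add_right_comm k 1 j]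
    | k + 1, [a] => simp [parseNodes, Nat.add_right_comm k 1 j]
    | k + 1, s :: i :: t => simp at hl
  | succ n ih =>
    intro l hl k j
    match k, l with
    | 0, l => simp [parseNodes]
    | k + 1, [] => simp [parseNodes, Nat.add_right_comm k 1 j]
    | k + 1, [a] => simp [parseNodes, Nat.add_right_comm k 1 j]
    | k + 1, s :: i :: t =>
      rw [Nat.add_right_comm k 1 j, parseNodes, parseNodes]
      by_cases hs : s = 0
      · simp only [hs, ite_true]
        exact ih t (by simp at hl ⊢; omega) k j
      · simp only [hs, ite_false]
        rw [show k + j + 4 = (k + 4) + j by omega]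
        exact ih t (by simp at hl ⊢; omega) (k + 4) j

lemma pMask_length {l r : List Int} (h : pMask l = some r) : r.length ≤ l.length :=
  parseNodes_length l.length l le_rfl 1 r h

lemma pMask_nil : pMask [] = none := rfl

lemma pMask_single (a : Int) : pMask [a] = none := rfl

lemma pMask_cases {s i : Int} {t r : List Int} (h : pMask (s :: i :: t) = some r) :
    (s = 0 ∧ r = t) ∨
    (s ≠ 0 ∧ ∃ r1 r2 r3, pMask t = some r1 ∧ pMask r1 = some r2 ∧ pMask r2 = some r3 ∧ pMask r3 = some r) := by
  unfold pMask at h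
  rw [parseNodes] at h
  by_cases hs : s = 0
  · simp only [hs, ite_true] at h
    simp [parseNodes] at h
    exact Or.inl ⟨hs, h.symm⟩
  · right
    refine ⟨hs, ?_⟩
    simp only [hs, ite_false] at h
    rw [show (4 : Nat) = 1 + 3 by rfl, parseNodes_add t.length t le_rfl 1 3] at h
    rcases hb1 : parseNodes 1 t with _ | r1 <;> rw [hb1] at h <;> simp at h
    rw [show (3 : Nat) = 1 + 2 by rfl, parseNodes_add r1.length r1 le_rfl 1 2] at h
    rcases hb2 : parseNodes 1 r1 with _ | r2 <;> rw [hb2] at h <;> simp at h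
    rw [show (2 : Nat) = 1 + 1 by rfl, parseNodes_add r2.length r2 le_rfl 1 1] at h
    rcases hb3 : parseNodes 1 r2 with _ | r3 <;> rw [hb3] at h <;> simp at h
    exact ⟨r1, r2, r3, hb1, hb2, hb3, h⟩

lemma tiles_sim0 : ∀ (n : Nat) (d : List Int), d.length ≤ n → ∀ (r : List Int), pMask d = some r →
    ∀ (fuel : Nat), d.length + 1 ≤ fuel → ∀ (x y z : Int),
    (tmTiles fuel x y z none d).2 = r ∧
    ∀ (st : List (Int × Int × Int × Int)) (d2 : List Int) (acc : List (List Int)),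
      altLoop ((x, y, z, 0) :: st) d d2 acc = altLoop st r d2 (acc ++ (tmTiles fuel x y z none d).1) := by
  intro n
  induction n with
  | zero =>
    intro d hd r hr
    rw [List.length_eq_zero_iff.mp (Nat.le_zero.mp hd), pMask_nil] at hr
    exact absurd hr (by simp)
  | succ n ih =>
    intro d hd r hr fuel hf x y z
    match d, hr with
    | [], hr => rw [pMask_nil] at hr; exact absurd hr (by simp)
    | [a], hr => rw [pMask_single] at hr; exact absurd hr (by simp)
    | s :: i :: t, hr =>
      obtain ⟨f, rfl⟩ : ∃ f, fuel = f + 1 := ⟨fuel - 1, by simp at hf; omega⟩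
      simp only [List.length_cons] at hd hf
      rcases pMask_cases hr with ⟨rfl, rfl⟩ | ⟨hs, r1, r2, r3, h1, h2, h3, h4⟩
      · constructor
        · simp [tmTiles]
        · intro st d2 acc
          rw [altLoop.eq_def]
          by_cases hi : i = 0 <;> simp [tmTiles, altPush, hi]
      · have l1 := pMask_length h1
        have l2 := pMask_length h2
        have l3 := pMask_length h3
        have l4 := pMask_length h4
        obtain ⟨e1, a1⟩ := ih t (by omega) r1 h1 f (by omega) (x * 2) (y * 2) (z + 1)
        obtain ⟨e2, a2⟩ := ih r1 (by omega) r2 h2 f (by omega) (x * 2 + 1) (y * 2) (z + 1)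
        obtain ⟨e3, a3⟩ := ih r2 (by omega) r3 h3 f (by omega) (x * 2) (y * 2 + 1) (z + 1)
        obtain ⟨e4, a4⟩ := ih r3 (by omega) r h4 f (by omega) (x * 2 + 1) (y * 2 + 1) (z + 1)
        rcases htm1 : tmTiles f (x * 2) (y * 2) (z + 1) none t with ⟨T1, R1⟩
        rw [htm1] at e1 a1; obtain rfl : r1 = R1 := e1.symm
        rcases htm2 : tmTiles f (x * 2 + 1) (y * 2) (z + 1) none r1 with ⟨T2, R2⟩
        rw [htm2] at e2 a2; obtain rfl : r2 = R2 := e2.symm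
        rcases htm3 : tmTiles f (x * 2) (y * 2 + 1) (z + 1) none r2 with ⟨T3, R3⟩
        rw [htm3] at e3 a3; obtain rfl : r3 = R3 := e3.symm
        rcases htm4 : tmTiles f (x * 2 + 1) (y * 2 + 1) (z + 1) none r3 with ⟨T4, R4⟩
        rw [htm4] at e4 a4; obtain rfl : r = R4 := e4.symm
        have hred : tmTiles (f + 1) x y z none (s :: i :: t)
            = ((if i ≠ 0 then [[x, y, z]] else []) ++ T1 ++ T2 ++ T3 ++ T4, r) := by
          simp [tmTiles, hs, htm1, htm2, htm3, htm4]
        refine ⟨by rw [hred], ?_⟩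
        intro st d2 acc
        rw [altLoop.eq_def]
        simp only [hred]
        by_cases hi : i = 0 <;>
          simp only [hi, hs, altPush, if_true, if_false, ite_true, ite_false, ne_eq,
            not_false_eq_true, not_true_eq_false, reduceIte, Int.reduceEq, add_zero] <;>
          · rw [a1, a2, a3, a4]
            simp [hi]

lemma tiles_sim1 : ∀ (n : Nat) (d : List Int), d.length ≤ n → ∀ (r : List Int), pMask d = some r →
    ∀ (fuel : Nat), d.length + 1 ≤ fuel → ∀ (x y z : Int),
    (tmTiles fuel x y z none d).2 = r ∧
    ∀ (st : List (Int × Int × Int × Int)) (d2 : List Int) (acc : List (List Int)),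
      altLoop ((x, y, z, 1) :: st) d2 d acc = altLoop st d2 r (acc ++ (tmTiles fuel x y z none d).1) := by
  intro n
  induction n with
  | zero =>
    intro d hd r hr
    rw [List.length_eq_zero_iff.mp (Nat.le_zero.mp hd), pMask_nil] at hr
    exact absurd hr (by simp)
  | succ n ih =>
    intro d hd r hr fuel hf x y z
    match d, hr with
    | [], hr => rw [pMask_nil] at hr; exact absurd hr (by simp)
    | [a], hr => rw [pMask_single] at hr; exact absurd hr (by simp)
    | s :: i :: t, hr =>
      obtain ⟨f, rfl⟩ : ∃ f, fuel = f + 1 := ⟨fuel - 1, by simp at hf; omega⟩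
      simp only [List.length_cons] at hd hf
      rcases pMask_cases hr with ⟨rfl, rfl⟩ | ⟨hs, r1, r2, r3, h1, h2, h3, h4⟩
      · constructor
        · simp [tmTiles]
        · intro st d2 acc
          rw [altLoop.eq_def]
          by_cases hi : i = 0 <;> simp [tmTiles, altPush, hi]
      · have l1 := pMask_length h1
        have l2 := pMask_length h2
        have l3 := pMask_length h3
        have l4 := pMask_length h4
        obtain ⟨e1, a1⟩ := ih t (by omega) r1 h1 f (by omega) (x * 2) (y * 2) (z + 1)
        obtain ⟨e2, a2⟩ := ih r1 (by omega) r2 h2 f (by omega) (x * 2 + 1) (y * 2) (z + 1)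
        obtain ⟨e3, a3⟩ := ih r2 (by omega) r3 h3 f (by omega) (x * 2) (y * 2 + 1) (z + 1)
        obtain ⟨e4, a4⟩ := ih r3 (by omega) r h4 f (by omega) (x * 2 + 1) (y * 2 + 1) (z + 1)
        rcases htm1 : tmTiles f (x * 2) (y * 2) (z + 1) none t with ⟨T1, R1⟩
        rw [htm1] at e1 a1; obtain rfl : r1 = R1 := e1.symm
        rcases htm2 : tmTiles f (x * 2 + 1) (y * 2) (z + 1) none r1 with ⟨T2, R2⟩
        rw [htm2] at e2 a2; obtain rfl : r2 = R2 := e2.symm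
        rcases htm3 : tmTiles f (x * 2) (y * 2 + 1) (z + 1) none r2 with ⟨T3, R3⟩
        rw [htm3] at e3 a3; obtain rfl : r3 = R3 := e3.symm
        rcases htm4 : tmTiles f (x * 2 + 1) (y * 2 + 1) (z + 1) none r3 with ⟨T4, R4⟩
        rw [htm4] at e4 a4; obtain rfl : r = R4 := e4.symm
        have hred : tmTiles (f + 1) x y z none (s :: i :: t)
            = ((if i ≠ 0 then [[x, y, z]] else []) ++ T1 ++ T2 ++ T3 ++ T4, r) := by
          simp [tmTiles, hs, htm1, htm2, htm3, htm4]
        refine ⟨by rw [hred], ?_⟩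
        intro st d2 acc
        rw [altLoop.eq_def]
        simp only [hred]
        by_cases hi : i = 0 <;>
          simp only [hi, hs, altPush, if_true, if_false, ite_true, ite_false, ne_eq,
            not_false_eq_true, not_true_eq_false, reduceIte, Int.reduceEq, add_zero] <;>
          · rw [a1, a2, a3, a4]
            simp [hi]

lemma union_sim : ∀ (n : Nat) (d1 d2 : List Int), d1.length + d2.length ≤ n →
    ∀ (r1 r2 : List Int), pMask d1 = some r1 → pMask d2 = some r2 →
    ∀ (fuel : Nat), d1.length + d2.length + 1 ≤ fuel → ∀ (x y z : Int),
    (tmUnion fuel x y z d1 d2).2.1 = r1 ∧ (tmUnion fuel x y z d1 d2).2.2 = r2 ∧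
    ∀ (st : List (Int × Int × Int × Int)) (acc : List (List Int)),
      altLoop ((x, y, z, 2) :: st) d1 d2 acc = altLoop st r1 r2 (acc ++ (tmUnion fuel x y z d1 d2).1) := by
  intro n
  induction n with
  | zero =>
    intro d1 d2 hd r1 r2 hr1 hr2
    have : d1 = [] := List.length_eq_zero_iff.mp (by omega)
    rw [this, pMask_nil] at hr1
    exact absurd hr1 (by simp)
  | succ n ih =>
    intro d1 d2 hd r1 r2 hr1 hr2 fuel hf x y z
    match d1, hr1 with
    | [], hr1 => rw [pMask_nil] at hr1; exact absurd hr1 (by simp)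
    | [a], hr1 => rw [pMask_single] at hr1; exact absurd hr1 (by simp)
    | s1 :: i1 :: t1, hr1 =>
      match d2, hr2 with
      | [], hr2 => rw [pMask_nil] at hr2; exact absurd hr2 (by simp)
      | [a], hr2 => rw [pMask_single] at hr2; exact absurd hr2 (by simp)
      | s2 :: i2 :: t2, hr2 =>
        obtain ⟨f, rfl⟩ : ∃ f, fuel = f + 1 := ⟨fuel - 1, by simp at hf; omega⟩
        simp only [List.length_cons] at hd hf
        rcases pMask_cases hr1 with ⟨hs1, rfl⟩ | ⟨hs1, q1, q2, q3, g1, g2, g3, g4⟩ <;>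
          rcases pMask_cases hr2 with ⟨hs2, rfl⟩ | ⟨hs2, w1, w2, w3, k1, k2, k3, k4⟩
        · -- both leaf
          subst hs1; subst hs2
          refine ⟨by simp [tmUnion], by simp [tmUnion], ?_⟩
          intro st acc
          rw [altLoop.eq_def]
          by_cases hi : i1 ≠ 0 ∨ i2 ≠ 0 <;> simp [tmUnion, altPush, hi]
        · -- only mask2
          subst hs1
          have l1 := pMask_length k1
          have l2 := pMask_length k2
          have l3 := pMask_length k3
          have l4 := pMask_length k4
          obtain ⟨e1, a1⟩ := tiles_sim1 t2.length t2 le_rfl w1 k1 f (by omega) (x * 2) (y * 2) (z + 1)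
          obtain ⟨e2, a2⟩ := tiles_sim1 w1.length w1 le_rfl w2 k2 f (by omega) (x * 2 + 1) (y * 2) (z + 1)
          obtain ⟨e3, a3⟩ := tiles_sim1 w2.length w2 le_rfl w3 k3 f (by omega) (x * 2) (y * 2 + 1) (z + 1)
          obtain ⟨e4, a4⟩ := tiles_sim1 w3.length w3 le_rfl r2 k4 f (by omega) (x * 2 + 1) (y * 2 + 1) (z + 1)
          rcases htm1 : tmTiles f (x * 2) (y * 2) (z + 1) none t2 with ⟨T1, R1⟩
          rw [htm1] at e1 a1; obtain rfl : w1 = R1 := e1.symm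
          rcases htm2 : tmTiles f (x * 2 + 1) (y * 2) (z + 1) none w1 with ⟨T2, R2⟩
          rw [htm2] at e2 a2; obtain rfl : w2 = R2 := e2.symm
          rcases htm3 : tmTiles f (x * 2) (y * 2 + 1) (z + 1) none w2 with ⟨T3, R3⟩
          rw [htm3] at e3 a3; obtain rfl : w3 = R3 := e3.symm
          rcases htm4 : tmTiles f (x * 2 + 1) (y * 2 + 1) (z + 1) none w3 with ⟨T4, R4⟩
          rw [htm4] at e4 a4; obtain rfl : r2 = R4 := e4.symm
          have hred : tmUnion (f + 1) x y z (0 :: i1 :: r1) (s2 :: i2 :: t2)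
              = ((if i1 ≠ 0 ∨ i2 ≠ 0 then [[x, y, z]] else []) ++ T1 ++ T2 ++ T3 ++ T4, r1, r2) := by
            simp [tmUnion, hs2, htm1, htm2, htm3, htm4]
          refine ⟨by rw [hred], by rw [hred], ?_⟩
          intro st acc
          rw [altLoop.eq_def]
          simp only [hred]
          by_cases hi : i1 ≠ 0 ∨ i2 ≠ 0 <;>
            simp only [hi, hs2, altPush, if_true, if_false, ne_eq,
              not_false_eq_true, not_true_eq_false, reduceIte, Int.reduceEq, add_zero,
              reduceCtorEq, ite_true, ite_false, false_and, and_false, true_and, and_true] <;>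
            · rw [a1, a2, a3, a4]
              simp [hi]
        · -- only mask1
          subst hs2
          have l1 := pMask_length g1
          have l2 := pMask_length g2
          have l3 := pMask_length g3
          have l4 := pMask_length g4
          obtain ⟨e1, a1⟩ := tiles_sim0 t1.length t1 le_rfl q1 g1 f (by omega) (x * 2) (y * 2) (z + 1)
          obtain ⟨e2, a2⟩ := tiles_sim0 q1.length q1 le_rfl q2 g2 f (by omega) (x * 2 + 1) (y * 2) (z + 1)
          obtain ⟨e3, a3⟩ := tiles_sim0 q2.length q2 le_rfl q3 g3 f (by omega) (x * 2) (y * 2 + 1) (z + 1)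
          obtain ⟨e4, a4⟩ := tiles_sim0 q3.length q3 le_rfl r1 g4 f (by omega) (x * 2 + 1) (y * 2 + 1) (z + 1)
          rcases htm1 : tmTiles f (x * 2) (y * 2) (z + 1) none t1 with ⟨T1, R1⟩
          rw [htm1] at e1 a1; obtain rfl : q1 = R1 := e1.symm
          rcases htm2 : tmTiles f (x * 2 + 1) (y * 2) (z + 1) none q1 with ⟨T2, R2⟩
          rw [htm2] at e2 a2; obtain rfl : q2 = R2 := e2.symm
          rcases htm3 : tmTiles f (x * 2) (y * 2 + 1) (z + 1) none q2 with ⟨T3, R3⟩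
          rw [htm3] at e3 a3; obtain rfl : q3 = R3 := e3.symm
          rcases htm4 : tmTiles f (x * 2 + 1) (y * 2 + 1) (z + 1) none q3 with ⟨T4, R4⟩
          rw [htm4] at e4 a4; obtain rfl : r1 = R4 := e4.symm
          have hred : tmUnion (f + 1) x y z (s1 :: i1 :: t1) (0 :: i2 :: r2)
              = ((if i1 ≠ 0 ∨ i2 ≠ 0 then [[x, y, z]] else []) ++ T1 ++ T2 ++ T3 ++ T4, r1, r2) := by
            simp [tmUnion, hs1, htm1, htm2, htm3, htm4]
          refine ⟨by rw [hred], by rw [hred], ?_⟩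
          intro st acc
          rw [altLoop.eq_def]
          simp only [hred]
          by_cases hi : i1 ≠ 0 ∨ i2 ≠ 0 <;>
            simp only [hi, hs1, altPush, if_true, if_false, ne_eq,
              not_false_eq_true, not_true_eq_false, reduceIte, Int.reduceEq, add_zero,
              reduceCtorEq, ite_true, ite_false, false_and, and_false, true_and, and_true] <;>
            · rw [a1, a2, a3, a4]
              simp [hi]
        · -- both submasks set
          have lg1 := pMask_length g1
          have lg2 := pMask_length g2
          have lg3 := pMask_length g3
          have lg4 := pMask_length g4
          have lk1 := pMask_length k1
          have lk2 := pMask_length k2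
          have lk3 := pMask_length k3
          have lk4 := pMask_length k4
          obtain ⟨e11, e12, a1⟩ := ih t1 t2 (by omega) q1 w1 g1 k1 f (by omega) (x * 2) (y * 2) (z + 1)
          obtain ⟨e21, e22, a2⟩ := ih q1 w1 (by omega) q2 w2 g2 k2 f (by omega) (x * 2 + 1) (y * 2) (z + 1)
          obtain ⟨e31, e32, a3⟩ := ih q2 w2 (by omega) q3 w3 g3 k3 f (by omega) (x * 2) (y * 2 + 1) (z + 1)
          obtain ⟨e41, e42, a4⟩ := ih q3 w3 (by omega) r1 r2 g4 k4 f (by omega) (x * 2 + 1) (y * 2 + 1) (z + 1)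
          rcases htm1 : tmUnion f (x * 2) (y * 2) (z + 1) t1 t2 with ⟨T1, Q1, W1⟩
          rw [htm1] at e11 e12 a1
          obtain rfl : q1 = Q1 := e11.symm
          obtain rfl : w1 = W1 := e12.symm
          rcases htm2 : tmUnion f (x * 2 + 1) (y * 2) (z + 1) q1 w1 with ⟨T2, Q2, W2⟩
          rw [htm2] at e21 e22 a2
          obtain rfl : q2 = Q2 := e21.symm
          obtain rfl : w2 = W2 := e22.symm
          rcases htm3 : tmUnion f (x * 2) (y * 2 + 1) (z + 1) q2 w2 with ⟨T3, Q3, W3⟩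
          rw [htm3] at e31 e32 a3
          obtain rfl : q3 = Q3 := e31.symm
          obtain rfl : w3 = W3 := e32.symm
          rcases htm4 : tmUnion f (x * 2 + 1) (y * 2 + 1) (z + 1) q3 w3 with ⟨T4, Q4, W4⟩
          rw [htm4] at e41 e42 a4
          obtain rfl : r1 = Q4 := e41.symm
          obtain rfl : r2 = W4 := e42.symm
          have hred : tmUnion (f + 1) x y z (s1 :: i1 :: t1) (s2 :: i2 :: t2)
              = ((if i1 ≠ 0 ∨ i2 ≠ 0 then [[x, y, z]] else []) ++ T1 ++ T2 ++ T3 ++ T4, r1, r2) := by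
            simp [tmUnion, hs1, hs2, htm1, htm2, htm3, htm4]
          refine ⟨by rw [hred], by rw [hred], ?_⟩
          intro st acc
          rw [altLoop.eq_def]
          simp only [hred]
          by_cases hi : i1 ≠ 0 ∨ i2 ≠ 0 <;>
            simp only [hi, hs1, hs2, altPush, if_true, if_false, ne_eq,
              not_false_eq_true, not_true_eq_false, reduceIte, Int.reduceEq, add_zero,
              reduceCtorEq, ite_true, ite_false, and_self, true_and, and_true] <;>
            · rw [a1, a2, a3, a4]
              simp [hi]

-- ===== VERDICT (by name: the statement is the Claim_ definition above) =====
theorem tileMaskUnion_py_spec : Claim_equal_tileMaskUnion_py := by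
  intro x y z d1 d2 _ hpre
  obtain ⟨hp1, hp2⟩ := hpre
  obtain ⟨v1, hv1⟩ := Option.isSome_iff_exists.mp hp1
  obtain ⟨v2, hv2⟩ := Option.isSome_iff_exists.mp hp2
  obtain ⟨-, -, a⟩ := union_sim (d1.length + d2.length) d1 d2 le_rfl v1 v2 hv1 hv2
    (d1.length + d2.length + 1) le_rfl x y z
  unfold Spec_tileMaskUnion_py tileMaskUnion_py tileMaskUnion_py_alt
  rw [a [] []]
  rw [altLoop.eq_def]
  simp
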